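-- pv_equiv track=rewrite | github.com/Ludong0909/PROGRAM | 111-2/PBC/hw0-5/hw5.py | find_troughs_wings
-- ===== SOURCE A (Python) =====
-- def find_troughs_wings (inlist, k = 2):
--     '''
--     Args:
--         inlist: list = the input list,\n
--         k: int
--
--     Return:
--         out: list or None
--     '''
--     out = []
--     for i in range(k+1,len(inlist)-k-1):
--             b = 0
--             if inlist[i-k-1] < inlist[i-k]:
--                 b = 1
--
--             for j in range(k):
--                 if inlist[i+j-k] > inlist[i+j-k+1]:
--                     a = 1
--
--                 else:
--                     a = -1
--                     break
--
--             if a != 1 or b != 1: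
--                 continue
--             b = 0
--             for j in range(k):
--                 if inlist[i+j] < inlist[i+j+1]:
--                     a = 1
--
--                 else:
--                     a = -1
--                     break
--
--             if inlist[i+k] > inlist[i+k+1]:
--                 b = 1
--
--             if a != 1 or b != 1:
--                 continue
--
--             out.append(i)
--     if len(out) == 0:
--         return None
--     else:
--         return out
-- ===== SOURCE B (Python) =====
-- def find_troughs_wings(inlist, k=2):
--     '''O(n): precompute strict-decrease/increase run lengths, then O(1) test per index.'''
--     n = len(inlist)
--     out = []
--     if k >= 1:
--         down = [0]  # down[t] = length of strict-decrease run ending at t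
--         up = [0]    # up[t]   = length of strict-increase run ending at t
--         for t in range(1, n):
--             down.append(down[-1] + 1 if inlist[t - 1] > inlist[t] else 0)
--             up.append(up[-1] + 1 if inlist[t - 1] < inlist[t] else 0)
--         for i in range(k + 1, n - k - 1):
--             if (down[i] >= k and inlist[i - k - 1] < inlist[i - k]
--                     and up[i + k] >= k and inlist[i + k] > inlist[i + k + 1]):
--                 out.append(i)
--     return out if out else None
-- ===== Notes on version B (the rewrite author's own statement) =====
-- stated objective: alternative
-- what changed: A re-scans the two k-long wings with inner loops for every candidate index (O(n*k) worst case, but the loops short-circuit); B precomputes strict-decrease and strict-increase run-length arrays in one pass and then tests each index in O(1), O(n) worst case but not measurably faster on random inputs.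
import Mathlib
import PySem

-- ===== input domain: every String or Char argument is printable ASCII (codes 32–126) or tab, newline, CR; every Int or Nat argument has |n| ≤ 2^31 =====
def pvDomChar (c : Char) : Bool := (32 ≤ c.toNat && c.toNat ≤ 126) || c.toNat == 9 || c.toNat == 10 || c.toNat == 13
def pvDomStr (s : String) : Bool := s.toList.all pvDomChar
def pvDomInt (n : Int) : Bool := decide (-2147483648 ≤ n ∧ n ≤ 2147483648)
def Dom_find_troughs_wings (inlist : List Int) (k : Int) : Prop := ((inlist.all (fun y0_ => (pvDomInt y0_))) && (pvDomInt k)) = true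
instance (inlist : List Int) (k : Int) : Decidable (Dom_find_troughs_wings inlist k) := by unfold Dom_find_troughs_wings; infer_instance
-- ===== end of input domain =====

-- B replaces A's per-index rescans of the two k-long wings by run-length arrays built in a
-- single pass with an O(1) test per index (an alternative algorithm; not measured faster,
-- since A's rescans short-circuit). Return values proved equal on Pre_.

-- ===== PORT A =====
-- inner "for j in range(k): … else: break" loop; the incoming value of Python's `a` is
-- read only when the range is empty, i.e. k ≤ 0, which Pre_ excludes on a nonempty outer loop,
-- so the port passes an arbitrary 0 for it.
def pvLoopA (p : Int → Bool) : List Int → Int → Int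
  | [], a => a
  | j :: rest, _ => if p j then pvLoopA p rest 1 else -1

def find_troughs_wings (inlist : List Int) (k : Int) : Option (List Int) :=
  let out : List Int :=
    (PySem.List.pyRange (k+1) ((inlist.length : Int) - k - 1) 1).foldl (fun out i =>
      let b : Int := if PySem.List.pyGetD inlist (i - k - 1) 0 < PySem.List.pyGetD inlist (i - k) 0 then 1 else 0
      let a : Int := pvLoopA (fun j => decide (PySem.List.pyGetD inlist (i + j - k) 0 > PySem.List.pyGetD inlist (i + j - k + 1) 0)) (PySem.List.pyRange 0 k 1) 0
      if a ≠ 1 ∨ b ≠ 1 then out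
      else
        let a : Int := pvLoopA (fun j => decide (PySem.List.pyGetD inlist (i + j) 0 < PySem.List.pyGetD inlist (i + j + 1) 0)) (PySem.List.pyRange 0 k 1) 0
        let b : Int := if PySem.List.pyGetD inlist (i + k) 0 > PySem.List.pyGetD inlist (i + k + 1) 0 then 1 else 0
        if a ≠ 1 ∨ b ≠ 1 then out else out ++ [i]) []
  if out.length = 0 then none else some out

-- ===== PORT B =====
-- one step of B's run-length pass: appends the next down/up run lengths (down[-1] / up[-1] are the lists' last entries)
def pvStep (xs : List Int) (du : List Int × List Int) (t : Int) : List Int × List Int :=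
  (du.1 ++ [if PySem.List.pyGetD xs (t-1) 0 > PySem.List.pyGetD xs t 0 then PySem.List.pyGetD du.1 (-1) 0 + 1 else 0],
   du.2 ++ [if PySem.List.pyGetD xs (t-1) 0 < PySem.List.pyGetD xs t 0 then PySem.List.pyGetD du.2 (-1) 0 + 1 else 0])

def find_troughs_wings_alt (inlist : List Int) (k : Int) : Option (List Int) :=
  let n : Int := inlist.length
  if 1 ≤ k then
    let du := (PySem.List.pyRange 1 n 1).foldl (pvStep inlist) ([0], [0])
    let out : List Int := (PySem.List.pyRange (k+1) (n-k-1) 1).foldl (fun out i =>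
      if k ≤ PySem.List.pyGetD du.1 i 0 ∧
         PySem.List.pyGetD inlist (i-k-1) 0 < PySem.List.pyGetD inlist (i-k) 0 ∧
         k ≤ PySem.List.pyGetD du.2 (i+k) 0 ∧
         PySem.List.pyGetD inlist (i+k) 0 > PySem.List.pyGetD inlist (i+k+1) 0
      then out ++ [i] else out) []
    if out = [] then none else some out
  else none

-- ===== PRECONDITION & SPEC =====
-- Pre_ excludes exactly the inputs on which A raises: k ≤ 0 with a nonempty outer loop
-- (range(k) is then empty, so `a` is read unbound → NameError, or IndexError for negative k).
def Pre_find_troughs_wings (inlist : List Int) (k : Int) : Prop :=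
  1 ≤ k ∨ (inlist.length : Int) ≤ 2*k + 2
instance (inlist : List Int) (k : Int) : Decidable (Pre_find_troughs_wings inlist k) := by unfold Pre_find_troughs_wings; infer_instance

def pvWitness_find_troughs_wings : List Int × Int := ([0, 5, 4, 0, 1, 2, 1], 2)

def Spec_find_troughs_wings (inlist : List Int) (k : Int) (out : Option (List Int)) : Prop := out = find_troughs_wings_alt inlist k
instance (inlist : List Int) (k : Int) (out : Option (List Int)) : Decidable (Spec_find_troughs_wings inlist k out) := by unfold Spec_find_troughs_wings; infer_instance

-- ===== CLAIM (what is proved, stated in full; the proofs are below) =====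
def Claim_equal_find_troughs_wings : Prop := ∀ (inlist : List Int) (k : Int), Dom_find_troughs_wings inlist k → Pre_find_troughs_wings inlist k → Spec_find_troughs_wings inlist k (find_troughs_wings inlist k)

-- ===== LEMMAS AND PROOFS =====

-- proof-side spec of B's run-length arrays: pvRunR r xs t = length of the run of r-steps ending at t
def pvRunR (r : Int → Int → Bool) (xs : List Int) : Nat → Int
  | 0 => 0
  | t+1 => if r (xs.getD t 0) (xs.getD (t+1) 0) then pvRunR r xs t + 1 else 0

lemma pvRunR_nonneg (r : Int → Int → Bool) (xs : List Int) (t : Nat) : 0 ≤ pvRunR r xs t := by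
  induction t with
  | zero => simp [pvRunR]
  | succ t ih => simp only [pvRunR]; split <;> omega

lemma pvRunR_char (r : Int → Int → Bool) (xs : List Int) :
    ∀ (k' t : Nat), k' ≤ t →
      ((k' : Int) ≤ pvRunR r xs t ↔ ∀ jn, jn < k' → r (xs.getD (t-1-jn) 0) (xs.getD (t-jn) 0) = true) := by
  intro k'
  induction k' with
  | zero => intro t _; simpa using pvRunR_nonneg r xs t
  | succ k' ih =>
    intro t ht
    obtain ⟨s, rfl⟩ : ∃ s, t = s + 1 := ⟨t - 1, by omega⟩
    simp only [pvRunR]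
    by_cases hc : r (xs.getD s 0) (xs.getD (s+1) 0) = true
    · rw [if_pos hc]
      constructor
      · intro h jn hjn
        match jn with
        | 0 => simpa using hc
        | jn+1 =>
          have hrec := (ih s (by omega)).mp (by push_cast at h ⊢; omega) jn (by omega)
          have e1 : s + 1 - 1 - (jn+1) = s - 1 - jn := by omega
          have e2 : s + 1 - (jn+1) = s - jn := by omega
          rw [e1, e2]; exact hrec
      · intro h
        have hrest : ∀ jn, jn < k' → r (xs.getD (s-1-jn) 0) (xs.getD (s-jn) 0) = true := by
          intro jn hjn
          have h' := h (jn+1) (by omega)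
          have e1 : s + 1 - 1 - (jn+1) = s - 1 - jn := by omega
          have e2 : s + 1 - (jn+1) = s - jn := by omega
          rwa [e1, e2] at h'
        have := (ih s (by omega)).mpr hrest
        push_cast; omega
    · rw [if_neg hc]
      constructor
      · intro h; exfalso; push_cast at h; omega
      · intro h; exfalso; exact hc (by simpa using h 0 (by omega))

lemma pvLoopA_eq_one (p : Int → Bool) :
    ∀ (js : List Int) (a0 : Int), js ≠ [] → (pvLoopA p js a0 = 1 ↔ ∀ j ∈ js, p j = true) := by
  intro js
  induction js with
  | nil => intro a0 h; exact absurd rfl h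
  | cons j rest ih =>
    intro a0 _
    simp only [pvLoopA]
    by_cases hj : p j = true
    · rw [if_pos hj]
      rcases eq_or_ne rest [] with h | h
      · subst h; simp [pvLoopA, hj]
      · rw [ih 1 h]; simp [hj]
    · rw [if_neg hj]
      constructor
      · intro h; exact absurd h (by decide)
      · intro h; exact absurd (h j (by simp)) hj

lemma pvLoopRun (r : Int → Int → Bool) (xs : List Int) (k e : Int) (p : Int → Bool)
    (hk : 0 < k) (hke : k ≤ e)
    (hp : ∀ jn : Nat, jn < k.toNat → p (k - 1 - jn) = r (xs.getD (e.toNat - 1 - jn) 0) (xs.getD (e.toNat - jn) 0)) :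
    (pvLoopA p (PySem.List.pyRange 0 k 1) 0 = 1 ↔ k ≤ pvRunR r xs e.toNat) := by
  have hne : PySem.List.pyRange 0 k 1 ≠ [] := by
    rw [PySem.List.pyRange_one_cons (by omega)]; simp
  rw [pvLoopA_eq_one p _ 0 hne]
  have hchar := pvRunR_char r xs k.toNat e.toNat (by omega)
  constructor
  · intro h
    have hall : ∀ jn, jn < k.toNat → r (xs.getD (e.toNat - 1 - jn) 0) (xs.getD (e.toNat - jn) 0) = true := by
      intro jn hjn
      have hj := h (k - 1 - jn) (by rw [PySem.List.mem_pyRange_one]; omega)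
      rwa [hp jn hjn] at hj
    have := hchar.mpr hall; omega
  · intro h j hj
    rw [PySem.List.mem_pyRange_one] at hj
    have hjn : (k - 1 - j).toNat < k.toNat := by omega
    have hval := hchar.mp (by omega) (k - 1 - j).toNat hjn
    have hpj := hp (k - 1 - j).toNat hjn
    have hje : k - 1 - (((k - 1 - j).toNat : Nat) : Int) = j := by omega
    rw [hje] at hpj
    rw [hpj]; exact hval

lemma pvDu_spec (xs : List Int) :
    ∀ m : Nat, 1 ≤ m →
      (PySem.List.pyRange 1 (m : Int) 1).foldl (pvStep xs) ([0], [0]) =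
        ((List.range m).map (fun t => pvRunR (fun a b => decide (a > b)) xs t),
         (List.range m).map (fun t => pvRunR (fun a b => decide (a < b)) xs t)) := by
  intro m hm
  induction m, hm using Nat.le_induction with
  | base =>
    rw [PySem.List.pyRange_one_eq_nil (by omega)]
    simp [List.range_succ, pvRunR]
  | succ m hm ih =>
    have hcast : ((m + 1 : Nat) : Int) = (m : Int) + 1 := by push_cast; ring
    rw [hcast, PySem.List.pyRange_one_succ_right (by omega), List.foldl_append, ih]
    simp only [List.foldl_cons, List.foldl_nil]
    unfold pvStep
    have hx1 : PySem.List.pyGetD xs ((m : Int) - 1) 0 = xs.getD (m-1) 0 := by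
      rw [show ((m : Int) - 1) = ((m - 1 : Nat) : Int) from by omega, PySem.List.pyGetD_natCast]
    have hx2 : PySem.List.pyGetD xs (m : Int) 0 = xs.getD m 0 := PySem.List.pyGetD_natCast xs m 0
    have hsplit : ∀ f : Nat → Int, (List.range m).map f = (List.range (m-1)).map f ++ [f (m-1)] := by
      intro f
      conv_lhs => rw [show m = (m-1)+1 from by omega, List.range_succ]
      simp
    have hrun : ∀ r : Int → Int → Bool, pvRunR r xs m =
        if r (xs.getD (m-1) 0) (xs.getD m 0) then pvRunR r xs (m-1) + 1 else 0 := by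
      intro r
      conv_lhs => rw [show m = (m-1)+1 from by omega]
      simp only [pvRunR]
      rw [show (m-1)+1 = m from by omega]
    rw [Prod.ext_iff]
    constructor
    · rw [hsplit, PySem.List.pyGetD_neg_one_append_singleton, ← hsplit,
         List.range_succ, List.map_append, List.map_cons, List.map_nil, hrun, hx1, hx2]
      split_ifs with h1 h2 h2 <;> simp_all <;> omega
    · rw [hsplit, PySem.List.pyGetD_neg_one_append_singleton, ← hsplit,
         List.range_succ, List.map_append, List.map_cons, List.map_nil, hrun, hx1, hx2]
      split_ifs with h1 h2 h2 <;> simp_all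

-- ===== VERDICT (by name: the statement is the Claim_ definition above) =====
theorem find_troughs_wings_spec : Claim_equal_find_troughs_wings := by
  intro inlist k hdom hpre
  unfold Spec_find_troughs_wings
  simp only [find_troughs_wings, find_troughs_wings_alt]
  by_cases hk : 1 ≤ k
  · rw [if_pos hk]
    by_cases hr : (inlist.length : Int) - k - 1 ≤ k + 1
    · rw [PySem.List.pyRange_one_eq_nil hr]
      simp
    · have h1m : 1 ≤ inlist.length := by omega
      rw [pvDu_spec inlist inlist.length h1m]
      have hbody : ∀ (acc : List Int) (i : Int), i ∈ PySem.List.pyRange (k+1) ((inlist.length : Int) - k - 1) 1 →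
          (if pvLoopA (fun j => decide (PySem.List.pyGetD inlist (i + j - k) 0 > PySem.List.pyGetD inlist (i + j - k + 1) 0)) (PySem.List.pyRange 0 k 1) 0 ≠ 1 ∨
              (if PySem.List.pyGetD inlist (i - k - 1) 0 < PySem.List.pyGetD inlist (i - k) 0 then (1:Int) else 0) ≠ 1 then acc
           else
             if pvLoopA (fun j => decide (PySem.List.pyGetD inlist (i + j) 0 < PySem.List.pyGetD inlist (i + j + 1) 0)) (PySem.List.pyRange 0 k 1) 0 ≠ 1 ∨
                (if PySem.List.pyGetD inlist (i + k) 0 > PySem.List.pyGetD inlist (i + k + 1) 0 then (1:Int) else 0) ≠ 1 then acc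
             else acc ++ [i]) =
          (if k ≤ PySem.List.pyGetD ((List.range inlist.length).map (fun t => pvRunR (fun a b => decide (a > b)) inlist t)) i 0 ∧
             PySem.List.pyGetD inlist (i-k-1) 0 < PySem.List.pyGetD inlist (i-k) 0 ∧
             k ≤ PySem.List.pyGetD ((List.range inlist.length).map (fun t => pvRunR (fun a b => decide (a < b)) inlist t)) (i+k) 0 ∧
             PySem.List.pyGetD inlist (i+k) 0 > PySem.List.pyGetD inlist (i+k+1) 0
           then acc ++ [i] else acc) := by
        intro acc i hi
        rw [PySem.List.mem_pyRange_one] at hi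
        have hB1 : PySem.List.pyGetD ((List.range inlist.length).map (fun t => pvRunR (fun a b => decide (a > b)) inlist t)) i 0 =
            pvRunR (fun a b => decide (a > b)) inlist i.toNat := by
          rw [show i = ((i.toNat : Nat) : Int) from by omega, PySem.List.pyGetD_natCast]
          simp [List.getD, List.getElem?_map, List.getElem?_range (show i.toNat < inlist.length from by omega)]
          congr 1
          omega
        have hB2 : PySem.List.pyGetD ((List.range inlist.length).map (fun t => pvRunR (fun a b => decide (a < b)) inlist t)) (i+k) 0 =
            pvRunR (fun a b => decide (a < b)) inlist (i+k).toNat := by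
          rw [show i + k = (((i+k).toNat : Nat) : Int) from by omega, PySem.List.pyGetD_natCast]
          simp [List.getD, List.getElem?_map, List.getElem?_range (show (i+k).toNat < inlist.length from by omega)]
          congr 1
          omega
        have hA1 := pvLoopRun (fun a b => decide (a > b)) inlist k i
          (fun j => decide (PySem.List.pyGetD inlist (i + j - k) 0 > PySem.List.pyGetD inlist (i + j - k + 1) 0))
          (by omega) (by omega) (by
            intro jn hjn
            simp only []
            rw [show i + (k - 1 - (jn : Int)) - k + 1 = ((i.toNat - jn : Nat) : Int) from by omega,
               show i + (k - 1 - (jn : Int)) - k = ((i.toNat - 1 - jn : Nat) : Int) from by omega,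
               PySem.List.pyGetD_natCast, PySem.List.pyGetD_natCast])
        have hA2 := pvLoopRun (fun a b => decide (a < b)) inlist k (i + k)
          (fun j => decide (PySem.List.pyGetD inlist (i + j) 0 < PySem.List.pyGetD inlist (i + j + 1) 0))
          (by omega) (by omega) (by
            intro jn hjn
            simp only []
            rw [show i + (k - 1 - (jn : Int)) + 1 = (((i+k).toNat - jn : Nat) : Int) from by omega,
               show i + (k - 1 - (jn : Int)) = (((i+k).toNat - 1 - jn : Nat) : Int) from by omega,
               PySem.List.pyGetD_natCast, PySem.List.pyGetD_natCast])
        rw [hB1, hB2]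
        simp only [ne_eq, hA1, hA2]
        by_cases hc1 : PySem.List.pyGetD inlist (i-k-1) 0 < PySem.List.pyGetD inlist (i-k) 0 <;>
          by_cases hc2 : PySem.List.pyGetD inlist (i+k) 0 > PySem.List.pyGetD inlist (i+k+1) 0 <;>
          by_cases hd : k ≤ pvRunR (fun a b => decide (a > b)) inlist i.toNat <;>
          by_cases hu : k ≤ pvRunR (fun a b => decide (a < b)) inlist (i+k).toNat <;>
          simp [hc1, hc2, hd, hu]
      rw [PySem.List.foldl_congr_mem _ _ _ _ (fun acc => fun i hi => hbody acc i hi)]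
      simp only [List.length_eq_zero_iff]
  · rw [if_neg hk]
    have hr : (inlist.length : Int) - k - 1 ≤ k + 1 := by
      unfold Pre_find_troughs_wings at hpre; omega
    rw [PySem.List.pyRange_one_eq_nil hr]
    simp
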